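-- pv_equiv track=rewrite | github.com/MelodicDrumstep/SJTU-CS3312-Computer-System-Security | Lab6_Decryption/riddle_man/present_cipher.py | key_function_80
-- ===== SOURCE A (Python) =====
-- s_box = (0xC, 0x5, 0x6, 0xB, 0x9, 0x0, 0xA, 0xD, 0x3, 0xE, 0xF, 0x8, 0x4, 0x7, 0x1, 0x2)
--
-- def key_function_80(key, round_count):
-- 	r = [1 if t == '1'else 0 for t in format(key, '080b')[::-1]]
-- 	h = r[-61:] + r[:-61]
--
-- 	round_key_int = 0
-- 	for index, ind_bit in enumerate(h):
-- 		round_key_int += (ind_bit << index)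
-- 	upper_nibble = round_key_int >> 76
-- 	upper_nibble = s_box[upper_nibble]
-- 	xor_portion = ((round_key_int >> 15) & 0x1F) ^ round_count
-- 	round_key_int = (round_key_int & 0x0FFFFFFFFFFFFFF07FFF) + (upper_nibble << 76) + (xor_portion << 15)
--
-- 	return round_key_int
-- ===== SOURCE B (Python) =====
-- s_box = (0xC, 0x5, 0x6, 0xB, 0x9, 0x0, 0xA, 0xD, 0x3, 0xE, 0xF, 0x8, 0x4, 0x7, 0x1, 0x2)
--
-- def key_function_80(key, round_count):
--     # rotate the 80-bit key right by 19 with integer arithmetic (no bit list)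
--     round_key_int = (key >> 19) + ((key & 0x7FFFF) << 61)
--     upper_nibble = s_box[round_key_int >> 76]
--     xor_portion = ((round_key_int >> 15) & 0x1F) ^ round_count
--     return (round_key_int & 0x0FFFFFFFFFFFFFF07FFF) + (upper_nibble << 76) + (xor_portion << 15)
-- ===== Notes on version B (the rewrite author's own statement) =====
-- stated objective: simpler
-- what changed: The round key is computed by one arithmetic right-rotation of the 80-bit key ((key >> 19) + ((key & 0x7FFFF) << 61)) instead of formatting the key to a binary string, reversing it into a bit list, slicing and concatenating, and reconstructing the integer with a shift-accumulate loop; the S-box/xor tail is unchanged.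
-- outside the precondition, e.g. on key_function_80(-5, 0): A returns 906705893926017949499392, B returns 226662061962696901787647
import Mathlib
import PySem

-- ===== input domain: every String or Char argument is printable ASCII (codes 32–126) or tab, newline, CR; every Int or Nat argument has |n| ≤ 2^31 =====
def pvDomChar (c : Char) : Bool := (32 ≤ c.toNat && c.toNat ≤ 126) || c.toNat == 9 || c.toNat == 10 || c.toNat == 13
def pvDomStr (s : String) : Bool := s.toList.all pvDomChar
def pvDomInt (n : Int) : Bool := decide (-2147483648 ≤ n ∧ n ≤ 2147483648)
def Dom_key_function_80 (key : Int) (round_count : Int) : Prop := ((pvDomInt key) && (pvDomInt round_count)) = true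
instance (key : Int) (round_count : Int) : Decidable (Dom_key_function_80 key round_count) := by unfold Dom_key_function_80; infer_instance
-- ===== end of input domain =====

-- B replaces A's bit-list rotation (format → reversed list → slice-concat → reconstruction loop)
-- by one arithmetic right-rotation of the 80-bit key: rk = (key >> 19) + ((key & 0x7FFFF) << 61);
-- the schedule tail (S-box nibble, round-counter xor, reassembly) is unchanged.

-- ===== PORT A =====
-- the module constant s_box
def sBox : List Int := [0xC, 0x5, 0x6, 0xB, 0x9, 0x0, 0xA, 0xD, 0x3, 0xE, 0xF, 0x8, 0x4, 0x7, 0x1, 0x2]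

-- format(key, '080b'): binary digits (PySem.Int.toBinChars) zero-padded to 80 chars; for a negative
-- key Python pads after the sign, this pads before it — the bit list r built from it below is the
-- same either way, since both '-' and '0' are read as a 0 bit.
def fmt080b (key : Int) : List Char :=
  let d := PySem.Int.toBinChars key
  List.replicate (80 - d.length) '0' ++ d

def key_function_80 (key : Int) (round_count : Int) : Int :=
  -- r = [1 if t == '1' else 0 for t in format(key, '080b')[::-1]]   ([::-1] = reverse)
  let r : List Int := (fmt080b key).reverse.map (fun t => if t = '1' then (1 : Int) else 0)
  -- h = r[-61:] + r[:-61]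
  let h : List Int := PySem.List.slice r (some (-61)) none ++ PySem.List.slice r none (some (-61))
  -- for index, ind_bit in enumerate(h): round_key_int += ind_bit << index
  -- (.toNat on the enumerate index is a totality guard: the index is always ≥ 0)
  let round_key_int : Int := (PySem.List.enumerate h).foldl (fun acc p => acc + p.2 <<< p.1.toNat) 0
  -- s_box[round_key_int >> 76]: Python raises IndexError out of range; here 0 ≤ round_key_int >> 76 < 16
  -- always (80-bit value), so the getD default is never used
  let upper_nibble : Int := (PySem.List.pyGet? sBox (round_key_int >>> (76 : Nat))).getD 0
  let xor_portion : Int := PySem.Int.bxor (PySem.Int.band (round_key_int >>> (15 : Nat)) 0x1F) round_count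
  PySem.Int.band round_key_int 0x0FFFFFFFFFFFFFF07FFF + (upper_nibble <<< (76 : Nat)) + (xor_portion <<< (15 : Nat))

-- ===== PORT B =====
def key_function_80_alt (key : Int) (round_count : Int) : Int :=
  -- round_key_int = (key >> 19) + ((key & 0x7FFFF) << 61)   (right-rotation of the 80-bit key by 19)
  let round_key_int : Int := (key >>> (19 : Nat)) + (PySem.Int.band key 0x7FFFF <<< (61 : Nat))
  -- s_box[round_key_int >> 76]: in range (-16 ≤ · < 16, Python's negative indices wrap) for every
  -- |key| ≤ 2^31, so the getD default is never used
  let upper_nibble : Int := (PySem.List.pyGet? sBox (round_key_int >>> (76 : Nat))).getD 0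
  let xor_portion : Int := PySem.Int.bxor (PySem.Int.band (round_key_int >>> (15 : Nat)) 0x1F) round_count
  PySem.Int.band round_key_int 0x0FFFFFFFFFFFFFF07FFF + (upper_nibble <<< (76 : Nat)) + (xor_portion <<< (15 : Nat))

-- ===== PRECONDITION & SPEC =====
-- Pre_ excludes negative keys: they are outside the cipher's 80-bit key domain, and there A reads
-- format's '-' sign character as a 0 bit, silently returning the schedule of |key|.
def Pre_key_function_80 (key : Int) (round_count : Int) : Prop := 0 ≤ key
instance (key : Int) (round_count : Int) : Decidable (Pre_key_function_80 key round_count) := by unfold Pre_key_function_80; infer_instance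
def pvWitness_key_function_80 : Int × Int := (5, 3)

def Spec_key_function_80 (key : Int) (round_count : Int) (out : Int) : Prop := out = key_function_80_alt key round_count
instance (key : Int) (round_count : Int) (out : Int) : Decidable (Spec_key_function_80 key round_count out) := by unfold Spec_key_function_80; infer_instance

-- ===== CLAIM (what is proved, stated in full; the proofs are below) =====
def Claim_equal_key_function_80 : Prop := ∀ (key : Int) (round_count : Int), Dom_key_function_80 key round_count → Pre_key_function_80 key round_count → Spec_key_function_80 key round_count (key_function_80 key round_count)

-- ===== LEMMAS AND PROOFS =====

-- LSB-first list of the k low bits of n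
def bitsW : Nat → Nat → List Nat
  | 0, _ => []
  | k + 1, n => n % 2 :: bitsW k (n / 2)

-- MSB-first binary digit characters (the shape Nat.toDigits 2 produces)
def binMSB (n : Nat) : List Char :=
  if n < 2 then [Nat.digitChar n]
  else binMSB (n / 2) ++ [Nat.digitChar (n % 2)]
  decreasing_by exact Nat.div_lt_self (by omega) (by omega)

def toBit (t : Char) : Nat := if t = '1' then 1 else 0

def horner (l : List Int) : Int := l.foldr (fun b acc => b + 2 * acc) 0

theorem toDigitsCore_eq_binMSB : ∀ (f n : Nat) (acc : List Char), n < f →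
    Nat.toDigitsCore 2 f n acc = binMSB n ++ acc := by
  intro f
  induction f with
  | zero => omega
  | succ f ih =>
    intro n acc hn
    rw [Nat.toDigitsCore]
    by_cases h2 : n < 2
    · have : n / 2 = 0 := by omega
      rw [binMSB]
      simp [this, h2]
      congr 1
      omega
    · have hd : ¬ n / 2 = 0 := by omega
      simp only [hd, if_false]
      rw [ih (n / 2) _ (by omega)]
      conv_rhs => rw [binMSB]
      simp [h2]

theorem toDigits_eq_binMSB (n : Nat) : Nat.toDigits 2 n = binMSB n :=
  (toDigitsCore_eq_binMSB (n + 1) n [] (by omega)).trans (by simp)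

theorem bitsW_zero (k : Nat) : bitsW k 0 = List.replicate k 0 := by
  induction k with
  | zero => rfl
  | succ k ih => simp [bitsW, ih, List.replicate_succ]

theorem binMSB_bits : ∀ (k n : Nat), n < 2 ^ (k + 1) →
    (binMSB n).reverse.map toBit ++ List.replicate (k + 1 - (binMSB n).length) 0 = bitsW (k + 1) n := by
  intro k
  induction k with
  | zero =>
    intro n hn
    have h2 : n < 2 := by omega
    rw [binMSB]
    simp [h2, bitsW, toBit]
    interval_cases n <;> simp [Nat.digitChar]
  | succ k ih =>
    intro n hn
    by_cases h2 : n < 2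
    · rw [binMSB]
      simp only [h2, if_true, List.reverse_singleton, List.map_cons, List.map_nil,
        List.length_singleton, bitsW]
      have hn2 : n / 2 = 0 := by omega
      have : toBit (Nat.digitChar n) = n % 2 := by interval_cases n <;> simp [Nat.digitChar, toBit]
      rw [this, hn2, bitsW_zero]
      simp [List.replicate_succ]
    · rw [binMSB]
      simp only [h2, if_false, List.reverse_append, List.reverse_singleton, List.length_append,
        List.length_singleton, List.map_cons, List.singleton_append]
      have hb : toBit (Nat.digitChar (n % 2)) = n % 2 := by
        rcases Nat.mod_two_eq_zero_or_one n with h | h <;> simp [h, Nat.digitChar, toBit]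
      have harith : k + 1 + 1 - ((binMSB (n / 2)).length + 1) = k + 1 - (binMSB (n / 2)).length := by omega
      rw [List.cons_append, hb, harith, bitsW]
      congr 1
      exact ih (n / 2) (by omega)

theorem bitsW_length (k n : Nat) : (bitsW k n).length = k := by
  induction k generalizing n with
  | zero => rfl
  | succ k ih => simp [bitsW, ih]

theorem bitsW_take : ∀ (m k n : Nat), m ≤ k → (bitsW k n).take m = bitsW m n := by
  intro m
  induction m with
  | zero => intro k n _; rfl
  | succ m ih =>
    intro k n hm
    obtain ⟨k', rfl⟩ : ∃ k', k = k' + 1 := ⟨k - 1, by omega⟩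
    simp [bitsW, ih k' (n / 2) (by omega)]

theorem bitsW_drop : ∀ (m k n : Nat), (bitsW k n).drop m = bitsW (k - m) (n / 2 ^ m) := by
  intro m
  induction m with
  | zero => intro k n; simp
  | succ m ih =>
    intro k n
    cases k with
    | zero => simp [bitsW]
    | succ k =>
      rw [bitsW, List.drop_succ_cons, ih k (n / 2), Nat.div_div_eq_div_mul,
        Nat.succ_sub_succ, ← pow_succ']

theorem horner_append (l1 l2 : List Int) :
    horner (l1 ++ l2) = horner l1 + 2 ^ l1.length * horner l2 := by
  induction l1 with
  | nil => simp [horner]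
  | cons b t ih =>
    simp only [horner, List.foldr, List.cons_append, List.length_cons] at *
    rw [ih]
    ring

theorem horner_cast_bitsW (k n : Nat) : horner ((bitsW k n).map Int.ofNat) = ((n % 2 ^ k : Nat) : Int) := by
  induction k generalizing n with
  | zero => simp [horner, bitsW, Nat.mod_one]
  | succ k ih =>
    simp only [horner, bitsW, List.map_cons, List.foldr] at *
    rw [ih (n / 2)]
    rw [pow_succ', Nat.mod_mul]
    simp only [Int.ofNat_eq_natCast]
    push_cast
    ring

theorem enum_fold : ∀ (l : List Int) (s acc : Int), 0 ≤ s →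
    (PySem.List.enumerate l s).foldl (fun a p => a + p.2 <<< p.1.toNat) acc
      = acc + 2 ^ s.toNat * horner l := by
  intro l
  induction l with
  | nil => intro s acc _; simp [PySem.List.enumerate_nil, horner]
  | cons b t ih =>
    intro s acc hs
    rw [PySem.List.enumerate_cons]
    simp only [List.foldl_cons]
    rw [ih (s + 1) _ (by omega)]
    simp only [horner, List.foldr]
    have h1 : (s + 1).toNat = s.toNat + 1 := by omega
    have h2 : b <<< s.toNat = b * 2 ^ s.toNat := by
      rw [Int.shiftLeft_eq]
    rw [h1, h2, pow_succ]
    ring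

-- the bit list A builds from format(key, '080b')[::-1] is bitsW 80 key.toNat (as integers)
theorem bits_eq (key : Int) (h0 : 0 ≤ key) (h1 : key ≤ 2 ^ 31) :
    ((fmt080b key).reverse.map (fun t => if t = '1' then (1 : Int) else 0))
      = (bitsW 80 key.toNat).map Int.ofNat := by
  have hsplit : (fun t => if t = '1' then (1 : Int) else 0) = Int.ofNat ∘ toBit := by
    funext t
    by_cases h : t = '1' <;> simp [toBit, h]
  rw [hsplit, ← List.map_map]
  congr 1
  have hkey : PySem.Int.toBinChars key = Nat.toDigits 2 key.toNat := by
    simp [PySem.Int.toBinChars, Int.not_lt.mpr h0]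
  rw [fmt080b]
  simp only [hkey, toDigits_eq_binMSB, List.reverse_append, List.reverse_replicate,
    List.map_append, List.map_replicate]
  have hz : toBit '0' = 0 := by simp [toBit]
  rw [hz]
  exact binMSB_bits 79 key.toNat (by omega)

-- the central fact: A's reconstructed rotated value equals B's arithmetic rotation
theorem rk_eq (key : Int) (h0 : 0 ≤ key) (h1 : key ≤ 2 ^ 31) :
    (PySem.List.enumerate
        (PySem.List.slice ((fmt080b key).reverse.map (fun t => if t = '1' then (1 : Int) else 0)) (some (-61)) none ++
         PySem.List.slice ((fmt080b key).reverse.map (fun t => if t = '1' then (1 : Int) else 0)) none (some (-61)))).foldl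
      (fun acc p => acc + p.2 <<< p.1.toNat) 0
      = (key >>> (19 : Nat)) + (PySem.Int.band key 0x7FFFF <<< (61 : Nat)) := by
  set n := key.toNat with hn
  have hkn : key = (n : Int) := by omega
  rw [bits_eq key h0 h1, ← hn]
  have hlen : ((bitsW 80 n).map Int.ofNat).length = 80 := by
    rw [List.length_map, bitsW_length]
  rw [PySem.List.slice_from_neg_ofNat _ 61 (by omega),
      PySem.List.slice_to_neg_ofNat _ 61 (by omega), hlen,
      ← List.map_drop, ← List.map_take]
  rw [enum_fold _ 0 0 (by omega)]
  rw [show ((80 : Nat) - 61) = 19 from rfl]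
  rw [bitsW_drop 19 80 n, bitsW_take 19 80 n (by omega), ← List.map_append]
  rw [List.map_append, horner_append, List.length_map, bitsW_length,
    horner_cast_bitsW, horner_cast_bitsW]
  have hdiv : n / 2 ^ 19 % 2 ^ (80 - 19) = n / 2 ^ 19 := by
    apply Nat.mod_eq_of_lt
    have hle : n / 2 ^ 19 ≤ 2 ^ 31 / 2 ^ 19 := by
      apply Nat.div_le_div_right; omega
    calc n / 2 ^ 19 ≤ 2 ^ 31 / 2 ^ 19 := hle
    _ < 2 ^ 61 := by norm_num
  have hshr : key >>> (19 : Nat) = ((n >>> 19 : Nat) : Int) := by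
    rw [hkn]; rfl
  have hband : PySem.Int.band key 0x7FFFF = ((n &&& 0x7FFFF : Nat) : Int) := by
    rw [hkn, show (0x7FFFF : Int) = ((0x7FFFF : Nat) : Int) from rfl, PySem.Int.band_natCast]
  have hshl : ((n &&& 0x7FFFF : Nat) : Int) <<< (61 : Nat) = (((n &&& 0x7FFFF) <<< 61 : Nat) : Int) := by
    rfl
  rw [hshr, hband, hshl, hdiv, Nat.shiftRight_eq_div_pow, Nat.shiftLeft_eq,
      show (0x7FFFF : Nat) = 2 ^ 19 - 1 by norm_num, Nat.and_two_pow_sub_one_eq_mod]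
  push_cast
  ring

-- ===== VERDICT (by name: the statement is the Claim_ definition above) =====
theorem key_function_80_spec : Claim_equal_key_function_80 := by
  intro key round_count hDom hPre
  have hkey : key ≤ 2 ^ 31 := by
    have h := hDom
    unfold Dom_key_function_80 pvDomInt at h
    simp only [Bool.and_eq_true, decide_eq_true_eq] at h
    omega
  unfold Spec_key_function_80 key_function_80 key_function_80_alt
  simp only []
  rw [rk_eq key hPre hkey]
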